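-- pv_equiv track=rewrite | github.com/xile42/leetcode | python3/3694. 删除子字符串后不同的终点.py | distinctPoints
-- ===== SOURCE A (Python) =====
-- def distinctPoints(s: str, k: int) -> int:
--
--     n = len(s)
--     d = {
--         "U": [0, 1],
--         "D": [0, -1],
--         "L": [-1, 0],
--         "R": [1, 0],
--     }
--
--     total_x, total_y = 0, 0
--     for c in s:
--         dx, dy = d[c]
--         total_x += dx
--         total_y += dy
--
--     pre_x = [0] * (n + 1)
--     pre_y = [0] * (n + 1)
--     for i, c in enumerate(s):
--         dx, dy = d[c]
--         pre_x[i + 1] = pre_x[i] + dx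
--         pre_y[i + 1] = pre_y[i] + dy
--
--     vis = set()
--     for i in range(0, n - k + 1):
--         x_to_sub = pre_x[i + k] - pre_x[i]
--         y_to_sub = pre_y[i + k] - pre_y[i]
--         x = total_x - x_to_sub
--         y = total_y - y_to_sub
--         vis.add((x, y))
--
--     return len(vis)
-- ===== SOURCE B (Python) =====
-- def distinctPoints(s: str, k: int) -> int:
--     # sliding window over displacement sums instead of prefix-sum tables
--     d = {
--         "U": (0, 1),
--         "D": (0, -1),
--         "L": (-1, 0),
--         "R": (1, 0),
--     }
--     n = len(s)
--     if k > n: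
--         return 0
--     deltas = [d[c] for c in s]
--     total_x = sum(dx for dx, _ in deltas)
--     total_y = sum(dy for _, dy in deltas)
--     win_x = sum(dx for dx, _ in deltas[:k])
--     win_y = sum(dy for _, dy in deltas[:k])
--     vis = {(total_x - win_x, total_y - win_y)}
--     for i in range(1, n - k + 1):
--         lx, ly = deltas[i - 1]
--         ex, ey = deltas[i + k - 1]
--         win_x += ex - lx
--         win_y += ey - ly
--         vis.add((total_x - win_x, total_y - win_y))
--     return len(vis)
-- ===== Notes on version B (the rewrite author's own statement) =====
-- stated objective: alternative
-- what changed: B drops A's two prefix-sum tables and instead maintains a single sliding-window displacement, updating it in O(1) per start by subtracting the leaving char's delta and adding the entering char's delta.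
import Mathlib
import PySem

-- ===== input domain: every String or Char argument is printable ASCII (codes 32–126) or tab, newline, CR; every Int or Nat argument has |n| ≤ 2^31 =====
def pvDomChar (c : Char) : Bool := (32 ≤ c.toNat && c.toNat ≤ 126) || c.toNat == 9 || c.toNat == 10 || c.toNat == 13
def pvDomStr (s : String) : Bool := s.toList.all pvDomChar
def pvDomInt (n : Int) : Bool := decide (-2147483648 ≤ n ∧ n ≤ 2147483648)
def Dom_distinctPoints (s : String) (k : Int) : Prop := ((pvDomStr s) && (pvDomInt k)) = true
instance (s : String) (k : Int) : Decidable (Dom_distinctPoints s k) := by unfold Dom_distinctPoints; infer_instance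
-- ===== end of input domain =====

-- B replaces A's prefix-sum tables with a sliding-window displacement updated in O(1) per start (alternative decomposition, same asymptotic cost).


-- the dict d, shared by both Pythons; a char outside it raises KeyError, which Pre_ excludes,
-- so the (0,0) fallback is never reached on admitted inputs
def pvDelta (c : Char) : Int × Int :=
  if c = 'U' then (0, 1)
  else if c = 'D' then (0, -1)
  else if c = 'L' then (-1, 0)
  else if c = 'R' then (1, 0)
  else (0, 0)

-- ===== PORT A =====
-- literal port: totals, then prefix-sum table (the two Python arrays, kept pairwise), then the window loop
def distinctPoints (s : String) (k : Int) : Int :=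
  let l := s.toList
  let n := l.length
  let tot := l.foldl (fun (p : Int × Int) c => (p.1 + (pvDelta c).1, p.2 + (pvDelta c).2)) (0, 0)
  let pre := List.scanl (fun (p : Int × Int) c => (p.1 + (pvDelta c).1, p.2 + (pvDelta c).2)) (0, 0) l
  let vis := (PySem.List.pyRange 0 ((n : Int) - k + 1) 1).foldl
    (fun (vis : PySem.Set (Int × Int)) i =>
      -- pre_x[i+k]/pre_x[i]: with 0 ≤ k (Pre_) these indices are always in range, default unreached
      let hi := PySem.List.pyGetD pre (i + k) (0, 0)
      let lo := PySem.List.pyGetD pre i (0, 0)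
      PySem.Set.add vis (tot.1 - (hi.1 - lo.1), tot.2 - (hi.2 - lo.2)))
    PySem.Set.empty
  PySem.Set.len vis

-- ===== PORT B =====
-- literal port of Source B: totals and initial window by summing, then the O(1) slide carrying (wx, wy, vis)
def distinctPoints_alt (s : String) (k : Int) : Int :=
  let l := s.toList
  let n := l.length
  if k > (n : Int) then 0 else
  let deltas := l.map pvDelta
  let tx := (deltas.map (·.1)).sum
  let ty := (deltas.map (·.2)).sum
  let wx := ((PySem.List.slice deltas none (some k)).map (·.1)).sum
  let wy := ((PySem.List.slice deltas none (some k)).map (·.2)).sum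
  let st := (PySem.List.pyRange 1 ((n : Int) - k + 1) 1).foldl
    (fun (st : Int × Int × PySem.Set (Int × Int)) i =>
      -- deltas[i-1]/deltas[i+k-1]: in range for every i of the loop under Pre_
      let lv := PySem.List.pyGetD deltas (i - 1) (0, 0)
      let ev := PySem.List.pyGetD deltas (i + k - 1) (0, 0)
      let wx' := st.1 + (ev.1 - lv.1)
      let wy' := st.2.1 + (ev.2 - lv.2)
      (wx', wy', PySem.Set.add st.2.2 (tx - wx', ty - wy')))
    (wx, wy, PySem.Set.add PySem.Set.empty (tx - wx, ty - wy))
  PySem.Set.len st.2.2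

-- ===== PRECONDITION & SPEC =====
-- Pre_ excludes exactly the inputs where A raises: a char outside the dict d (KeyError) and k < 0
-- (IndexError: the loop then reads pre_x[n - k], past the table).
def Pre_distinctPoints (s : String) (k : Int) : Prop :=
  (s.toList.all fun c => c == 'U' || c == 'D' || c == 'L' || c == 'R') = true ∧ 0 ≤ k
instance (s : String) (k : Int) : Decidable (Pre_distinctPoints s k) := by
  unfold Pre_distinctPoints; infer_instance

def pvWitness_distinctPoints : String × Int := ("UD", 1)

def Spec_distinctPoints (s : String) (k : Int) (out : Int) : Prop := out = distinctPoints_alt s k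
instance (s : String) (k : Int) (out : Int) : Decidable (Spec_distinctPoints s k out) := by
  unfold Spec_distinctPoints; infer_instance

-- ===== CLAIM (what is proved, stated in full; the proofs are below) =====
def Claim_equal_distinctPoints : Prop := ∀ (s : String) (k : Int), Dom_distinctPoints s k → Pre_distinctPoints s k → Spec_distinctPoints s k (distinctPoints s k)

-- ===== LEMMAS AND PROOFS =====

-- x- and y-components of the total displacement of a char list
def pvSumX (l : List Char) : Int := (l.map (fun c => (pvDelta c).1)).sum
def pvSumY (l : List Char) : Int := (l.map (fun c => (pvDelta c).2)).sum

-- the endpoint reached after deleting the window of length K starting at j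
def pvG (l : List Char) (K j : Nat) : Int × Int :=
  (pvSumX l - (pvSumX (l.take (j + K)) - pvSumX (l.take j)),
   pvSumY l - (pvSumY (l.take (j + K)) - pvSumY (l.take j)))

lemma pvFoldl_pair (l : List Char) (p : Int × Int) :
    l.foldl (fun (p : Int × Int) c => (p.1 + (pvDelta c).1, p.2 + (pvDelta c).2)) p
      = (p.1 + pvSumX l, p.2 + pvSumY l) := by
  induction l generalizing p with
  | nil => simp [pvSumX, pvSumY]
  | cons c t ih =>
    simp only [List.foldl_cons, ih, pvSumX, pvSumY, List.map_cons, List.sum_cons]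
    exact Prod.ext (by ring) (by ring)

lemma pvScanl_getD (l : List Char) (p : Int × Int) (j : Nat) (hj : j ≤ l.length) :
    (List.scanl (fun (p : Int × Int) c => (p.1 + (pvDelta c).1, p.2 + (pvDelta c).2)) p l).getD j (0, 0)
      = (p.1 + pvSumX (l.take j), p.2 + pvSumY (l.take j)) := by
  induction l generalizing p j with
  | nil =>
    obtain rfl : j = 0 := Nat.le_zero.mp (by simpa using hj)
    simp [pvSumX, pvSumY]
  | cons c t ih =>
    cases j with
    | zero => simp [pvSumX, pvSumY]
    | succ j =>
      simp only [List.scanl_cons, List.getD_cons_succ, List.take_succ_cons]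
      rw [ih _ j (by simpa using hj)]
      simp only [pvSumX, pvSumY, List.map_cons, List.sum_cons]
      exact Prod.ext (by ring) (by ring)

lemma pvSumX_take_succ (l : List Char) (j : Nat) (hj : j < l.length) :
    pvSumX (l.take (j + 1)) = pvSumX (l.take j) + (pvDelta l[j]).1 := by
  simp only [pvSumX, List.map_take]
  rw [List.sum_take_succ _ j (by simpa using hj)]
  simp

lemma pvSumY_take_succ (l : List Char) (j : Nat) (hj : j < l.length) :
    pvSumY (l.take (j + 1)) = pvSumY (l.take j) + (pvDelta l[j]).2 := by
  simp only [pvSumY, List.map_take]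
  rw [List.sum_take_succ _ j (by simpa using hj)]
  simp

lemma pvRange_one_shift (t : Nat) :
    PySem.List.pyRange 1 ((t : Int) + 1) 1 = (List.range t).map (fun j : Nat => ((j : Int) + 1)) := by
  induction t with
  | zero => simp [PySem.List.pyRange_one_eq_nil]
  | succ t ih =>
    push_cast
    rw [PySem.List.pyRange_one_succ_right (by omega : (1 : Int) ≤ (t : Int) + 1), ih, List.range_succ]
    simp

lemma pvDeltas_getD (l : List Char) (j : Nat) (hj : j < l.length) :
    (l.map pvDelta).getD j (0, 0) = pvDelta l[j] := by
  rw [List.getD_eq_getElem?_getD, List.getElem?_map, List.getElem?_eq_getElem hj]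
  rfl

-- the sliding-window invariant of B's loop
lemma pvBfold (l : List Char) (K : Nat) (hK : K ≤ l.length) (t : Nat) (ht : t ≤ l.length - K)
    (v0 : PySem.Set (Int × Int)) :
    ((List.range t).map (fun j : Nat => ((j : Int) + 1))).foldl
      (fun (st : Int × Int × PySem.Set (Int × Int)) i =>
        let lv := PySem.List.pyGetD (l.map pvDelta) (i - 1) (0, 0)
        let ev := PySem.List.pyGetD (l.map pvDelta) (i + (K : Int) - 1) (0, 0)
        let wx' := st.1 + (ev.1 - lv.1)
        let wy' := st.2.1 + (ev.2 - lv.2)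
        (wx', wy', PySem.Set.add st.2.2 (pvSumX l - wx', pvSumY l - wy')))
      (pvSumX (l.take K), pvSumY (l.take K), v0)
    = (pvSumX (l.take (t + K)) - pvSumX (l.take t),
       pvSumY (l.take (t + K)) - pvSumY (l.take t),
       (List.range t).foldl (fun v j => PySem.Set.add v (pvG l K (j + 1))) v0) := by
  induction t with
  | zero => simp [pvSumX, pvSumY]
  | succ t ih =>
    have ht' : t ≤ l.length - K := by omega
    rw [List.range_succ, List.map_append, List.foldl_append, ih ht', List.foldl_append]
    simp only [List.map_cons, List.map_nil, List.foldl_cons, List.foldl_nil]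
    have h1 : ((t : Int) + 1 - 1) = ((t : Nat) : Int) := by ring
    have h2 : ((t : Int) + 1 + (K : Int) - 1) = (((t + K : Nat)) : Int) := by push_cast; ring
    have hlt : t < l.length := by omega
    have hlt2 : t + K < l.length := by omega
    rw [h1, h2, PySem.List.pyGetD_natCast, PySem.List.pyGetD_natCast,
        pvDeltas_getD l t hlt, pvDeltas_getD l (t + K) hlt2]
    have ex : pvSumX (l.take (t + K)) - pvSumX (l.take t) + ((pvDelta l[t + K]).1 - (pvDelta l[t]).1)
        = pvSumX (l.take (t + 1 + K)) - pvSumX (l.take (t + 1)) := by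
      rw [show t + 1 + K = (t + K) + 1 by ring, pvSumX_take_succ l (t + K) hlt2,
          pvSumX_take_succ l t hlt]; ring
    have ey : pvSumY (l.take (t + K)) - pvSumY (l.take t) + ((pvDelta l[t + K]).2 - (pvDelta l[t]).2)
        = pvSumY (l.take (t + 1 + K)) - pvSumY (l.take (t + 1)) := by
      rw [show t + 1 + K = (t + K) + 1 by ring, pvSumY_take_succ l (t + K) hlt2,
          pvSumY_take_succ l t hlt]; ring
    rw [ex, ey]
    simp [pvG]

-- ===== VERDICT (by name: the statement is the Claim_ definition above) =====
theorem distinctPoints_spec : Claim_equal_distinctPoints := by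
  intro s k _ hpre
  obtain ⟨-, hk⟩ := hpre
  simp only [Spec_distinctPoints, distinctPoints, distinctPoints_alt]
  set l := s.toList with hl
  set n := l.length with hn
  obtain ⟨K, rfl⟩ : ∃ K : Nat, k = (K : Int) := ⟨k.toNat, (Int.toNat_of_nonneg hk).symm⟩
  by_cases hbig : n < K
  · -- window does not fit: A's range is empty, B returns 0 at the guard
    rw [PySem.List.pyRange_one_eq_nil (by omega : ((n : Int) - (K : Int) + 1) ≤ 0),
        if_pos (by exact_mod_cast hbig : ((K : Nat) : Int) > (n : Int))]
    simp [PySem.Set.len, PySem.Set.empty]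
  · replace hbig : K ≤ n := Nat.le_of_not_lt hbig
    set m := n - K with hm
    rw [if_neg (by omega : ¬ ((K : Nat) : Int) > (n : Int))]
    rw [show ((n : Int) - (K : Int) + 1) = (((m + 1 : Nat)) : Int) by omega]
    -- A side: totals, prefix table reads, range as mapped List.range
    rw [pvFoldl_pair]
    rw [show ((0 : Int) + pvSumX l, (0 : Int) + pvSumY l) = (pvSumX l, pvSumY l) by simp]
    rw [PySem.List.pyRange_zero_natCast, List.foldl_map]
    -- B side: initial window via slice, loop via the sliding invariant
    rw [show (((m + 1 : Nat)) : Int) = ((m : Int) + 1) by push_cast; ring, pvRange_one_shift]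
    rw [show ((PySem.List.slice (l.map pvDelta) none (some ((K : Nat) : Int))).map (fun x => x.1)).sum
          = pvSumX (l.take K) by
        rw [PySem.List.slice_to _ (by omega), Int.toNat_natCast]
        simp [pvSumX, List.map_take, Function.comp_def]]
    rw [show ((PySem.List.slice (l.map pvDelta) none (some ((K : Nat) : Int))).map (fun x => x.2)).sum
          = pvSumY (l.take K) by
        rw [PySem.List.slice_to _ (by omega), Int.toNat_natCast]
        simp [pvSumY, List.map_take, Function.comp_def]]
    rw [show ((l.map pvDelta).map (fun x => x.1)).sum = pvSumX l by simp [pvSumX, Function.comp_def]]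
    rw [show ((l.map pvDelta).map (fun x => x.2)).sum = pvSumY l by simp [pvSumY, Function.comp_def]]
    rw [pvBfold l K hbig m (by omega)]
    rw [show (pvSumX l - pvSumX (l.take K), pvSumY l - pvSumY (l.take K)) = pvG l K 0 by
        simp [pvG, pvSumX, pvSumY]]
    -- turn B's fold (from ∅.add (pvG 0) over 1..m) back into a fold over range (m+1)
    rw [show (List.range m).foldl (fun v j => PySem.Set.add v (pvG l K (j + 1)))
          (PySem.Set.add PySem.Set.empty (pvG l K 0))
        = (List.range (m + 1)).foldl (fun v j => PySem.Set.add v (pvG l K j)) PySem.Set.empty by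
        rw [List.range_succ_eq_map, List.foldl_cons, List.foldl_map]]
    -- the two fold bodies agree pointwise on range (m+1)
    congr 1
    apply PySem.List.foldl_congr_mem
    intro acc j hj
    have hj' : j < m + 1 := List.mem_range.mp hj
    have hjK : j + K ≤ n := by omega
    simp only
    rw [show ((j : Nat) : Int) + ((K : Nat) : Int) = (((j + K : Nat)) : Int) by push_cast; ring,
        PySem.List.pyGetD_natCast, PySem.List.pyGetD_natCast,
        pvScanl_getD l (0, 0) (j + K) (by omega),
        pvScanl_getD l (0, 0) j (by omega)]
    simp only [pvG, zero_add]
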